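-- pv_equiv track=rewrite | github.com/raeez/ainfinity-chiral-hochschild-cohomology-3d-qft | compute/ising_e1_shadow_complete.py | ising_spin_character_coeffs
-- ===== SOURCE A (Python) =====
-- from typing import Dict, List, Tuple
--
-- def ising_spin_character_coeffs(max_level: int) -> List[int]:
--     """Character of L(1/2, 1/16) = spin module of Ising."""
--     # (r,s) = (1,2) in M(3,4).
--     # A_k = ((24k + 4 - 6)^2 - 1)/48 = ((24k-2)^2 - 1)/48 = (576k^2 - 96k + 3)/48 = 12k^2 - 2k + 1/16
--     # A_k - h = A_k - 1/16 = 12k^2 - 2k = 2k(6k-1)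
--     # For k=0: 0. k=1: 10. k=-1: 14. k=2: 44. k=-2: 52.
--
--     # B_k = ((24k + 4 + 6)^2 - 1)/48 = ((24k+10)^2 - 1)/48 = (576k^2 + 480k + 99)/48
--     #     = 12k^2 + 10k + 99/48 = 12k^2 + 10k + 33/16
--     # B_k - h = 12k^2 + 10k + 33/16 - 1/16 = 12k^2 + 10k + 2
--     # For k=0: 2. k=-1: 4. k=1: 24. k=-2: 30.
--
--     partitions = [0] * (max_level + 1)
--     partitions[0] = 1
--     for k in range(1, max_level + 1):
--         for n in range(k, max_level + 1):
--             partitions[n] += partitions[n - k]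
--
--     theta = [0] * (max_level + 1)
--     for k in range(-100, 101):
--         exp1 = 2 * k * (6 * k - 1)
--         if 0 <= exp1 <= max_level:
--             theta[exp1] += 1
--         exp2 = 12 * k * k + 10 * k + 2
--         if 0 <= exp2 <= max_level:
--             theta[exp2] -= 1
--
--     dims = [0] * (max_level + 1)
--     for n in range(max_level + 1):
--         total = 0
--         for m in range(n + 1):
--             total += theta[m] * partitions[n - m]
--         dims[n] = total
--
--     return dims
-- ===== SOURCE B (Python) =====
-- from typing import List
--
--
-- def ising_spin_character_coeffs(max_level: int) -> List[int]:
--     """Character of L(1/2, 1/16) = spin module of Ising."""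
--     # Instead of building the partition series and convolving it with theta
--     # (two quadratic passes), seed the output array with the sparse theta
--     # terms (same fixed k-window [-100, 100] as the original) and run Euler's
--     # part-by-part accumulation q**e -> q**e / prod(1 - q**k) directly on it:
--     # one quadratic pass, no partitions array and no convolution.
--     terms = []
--     for k in range(-100, 101):
--         terms.append((2 * k * (6 * k - 1), 1))
--         terms.append((12 * k * k + 10 * k + 2, -1))
--
--     dims = [0] * (max_level + 1)
--     for e, s in terms:
--         if e <= max_level:
--             dims[e] += s
--
--     for k in range(1, max_level + 1):
--         for n in range(k, max_level + 1):
--             dims[n] += dims[n - k]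
--
--     return dims
-- ===== Notes on version B (the rewrite author's own statement) =====
-- stated objective: alternative
-- what changed: B drops the partitions array and the quadratic convolution pass: it seeds the output array with the sparse theta terms (same fixed k-window as A) and runs Euler's part-by-part accumulation directly on that array, one quadratic pass instead of two (same asymptotic cost).
import Mathlib
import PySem

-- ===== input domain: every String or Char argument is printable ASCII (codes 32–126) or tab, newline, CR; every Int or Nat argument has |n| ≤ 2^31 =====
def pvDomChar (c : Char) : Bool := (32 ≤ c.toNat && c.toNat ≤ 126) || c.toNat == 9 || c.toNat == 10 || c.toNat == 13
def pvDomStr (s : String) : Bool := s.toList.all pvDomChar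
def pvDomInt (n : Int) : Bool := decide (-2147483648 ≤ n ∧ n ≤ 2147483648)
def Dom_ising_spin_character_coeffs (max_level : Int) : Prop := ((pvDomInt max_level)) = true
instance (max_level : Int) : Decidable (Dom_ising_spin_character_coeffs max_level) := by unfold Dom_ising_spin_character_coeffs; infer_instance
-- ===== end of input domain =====

-- B replaces A's partitions-array + quadratic convolution by seeding the output with the sparse theta
-- terms and running the part-by-part Euler accumulation directly on it: one quadratic pass instead of
-- two (same asymptotic cost, so not claimed as faster).

-- ===== PORT A =====
def ising_spin_character_coeffs (max_level : Int) : List Int :=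
  let partitions : List Int := (List.replicate (max_level + 1).toNat (0:Int)).set 0 1
  let partitions := (PySem.List.pyRange 1 (max_level + 1) 1).foldl (fun p k =>
    (PySem.List.pyRange k (max_level + 1) 1).foldl (fun p n =>
      p.set n.toNat (PySem.List.pyGetD p n 0 + PySem.List.pyGetD p (n - k) 0)) p) partitions
  let theta : List Int := List.replicate (max_level + 1).toNat (0:Int)
  let theta := (PySem.List.pyRange (-100) 101 1).foldl (fun t k =>
    let exp1 := 2 * k * (6 * k - 1)
    let t := if 0 ≤ exp1 ∧ exp1 ≤ max_level then t.set exp1.toNat (PySem.List.pyGetD t exp1 0 + 1) else t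
    let exp2 := 12 * k * k + 10 * k + 2
    if 0 ≤ exp2 ∧ exp2 ≤ max_level then t.set exp2.toNat (PySem.List.pyGetD t exp2 0 - 1) else t) theta
  let dims : List Int := List.replicate (max_level + 1).toNat (0:Int)
  let dims := (PySem.List.pyRange 0 (max_level + 1) 1).foldl (fun d n =>
    let total := (PySem.List.pyRange 0 (n + 1) 1).foldl (fun total m =>
      total + PySem.List.pyGetD theta m 0 * PySem.List.pyGetD partitions (n - m) 0) 0
    d.set n.toNat total) dims
  dims

-- ===== PORT B =====
def ising_spin_character_coeffs_alt (max_level : Int) : List Int :=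
  let terms : List (Int × Int) := (PySem.List.pyRange (-100) 101 1).foldl (fun acc k =>
    (acc ++ [(2 * k * (6 * k - 1), (1:Int))]) ++ [(12 * k * k + 10 * k + 2, (-1:Int))]) []
  let dims : List Int := List.replicate (max_level + 1).toNat (0:Int)
  let dims := terms.foldl (fun d es =>
    if es.1 ≤ max_level then d.set es.1.toNat (PySem.List.pyGetD d es.1 0 + es.2) else d) dims
  let dims := (PySem.List.pyRange 1 (max_level + 1) 1).foldl (fun d k =>
    (PySem.List.pyRange k (max_level + 1) 1).foldl (fun d n =>
      d.set n.toNat (PySem.List.pyGetD d n 0 + PySem.List.pyGetD d (n - k) 0)) d) dims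
  dims

-- ===== PRECONDITION & SPEC =====
-- Python A raises IndexError on negative max_level (it assigns into an empty partitions list); exactly those inputs are excluded.
def Pre_ising_spin_character_coeffs (max_level : Int) : Prop := 0 ≤ max_level
instance (max_level : Int) : Decidable (Pre_ising_spin_character_coeffs max_level) := by unfold Pre_ising_spin_character_coeffs; infer_instance
def pvWitness_ising_spin_character_coeffs : Int := 3

def Spec_ising_spin_character_coeffs (max_level : Int) (out : List Int) : Prop := out = ising_spin_character_coeffs_alt max_level
instance (max_level : Int) (out : List Int) : Decidable (Spec_ising_spin_character_coeffs max_level out) := by unfold Spec_ising_spin_character_coeffs; infer_instance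

-- ===== CLAIM (what is proved, stated in full; the proofs are below) =====
def Claim_equal_ising_spin_character_coeffs : Prop := ∀ (max_level : Int), Dom_ising_spin_character_coeffs max_level → Pre_ising_spin_character_coeffs max_level → Spec_ising_spin_character_coeffs max_level (ising_spin_character_coeffs max_level)

-- ===== LEMMAS AND PROOFS =====

def pvPass (k : ℕ) (f : ℕ → ℤ) (n : ℕ) : ℤ :=
  f n + (if _h : 0 < k ∧ k ≤ n then pvPass k f (n - k) else 0)
termination_by n
decreasing_by omega

theorem pvPass_conv (j : ℕ) (hj : 0 < j) (θ f g : ℕ → ℤ)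
    (hg : ∀ n, g n = ∑ m ∈ Finset.range (n + 1), θ m * f (n - m)) :
    ∀ n, pvPass j g n = ∑ m ∈ Finset.range (n + 1), θ m * pvPass j f (n - m) := by
  intro n
  induction n using Nat.strong_induction_on with
  | _ n ih =>
    rw [pvPass]
    have hrhs : ∀ m ∈ Finset.range (n + 1),
        θ m * pvPass j f (n - m)
        = θ m * f (n - m) + θ m * (if 0 < j ∧ j ≤ n - m then pvPass j f (n - m - j) else 0) := by
      intro m _
      rw [pvPass, mul_add, dite_eq_ite]
    rw [Finset.sum_congr rfl hrhs, Finset.sum_add_distrib, ← hg]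
    congr 1
    by_cases h : j ≤ n
    · rw [dif_pos ⟨hj, h⟩, ih (n - j) (by omega)]
      have hsub : Finset.range (n - j + 1) ⊆ Finset.range (n + 1) := by
        intro x hx
        simp only [Finset.mem_range] at *
        omega
      have hvan : ∀ m ∈ Finset.range (n + 1), m ∉ Finset.range (n - j + 1) →
          θ m * (if 0 < j ∧ j ≤ n - m then pvPass j f (n - m - j) else 0) = 0 := by
        intro m hm hnm
        simp only [Finset.mem_range] at hm hnm
        rw [if_neg (by omega), mul_zero]
      rw [← Finset.sum_subset hsub hvan]
      apply Finset.sum_congr rfl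
      intro m hm
      simp only [Finset.mem_range] at hm
      rw [if_pos ⟨hj, by omega⟩]
      have : n - j - m = n - m - j := by omega
      rw [this]
    · rw [dif_neg (by omega)]
      symm
      apply Finset.sum_eq_zero
      intro m hm
      simp only [Finset.mem_range] at hm
      rw [if_neg (by omega), mul_zero]

def pvIter (f : ℕ → ℤ) : ℕ → ℕ → ℤ
  | 0 => f
  | k + 1 => pvPass (k + 1) (pvIter f k)
def pvE0 (n : ℕ) : ℤ := if n = 0 then 1 else 0

theorem pvIter_conv (θ : ℕ → ℤ) (K : ℕ) :
    ∀ n, pvIter θ K n = ∑ m ∈ Finset.range (n + 1), θ m * pvIter pvE0 K (n - m) := by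
  induction K with
  | zero =>
    intro n
    rw [Finset.sum_eq_single n]
    · simp [pvIter, pvE0]
    · intro b hb hbn
      simp only [Finset.mem_range] at hb
      have : ¬ (n - b = 0) := by omega
      simp [pvIter, pvE0, this]
    · intro hn
      simp only [Finset.mem_range] at hn
      omega
  | succ K ihK =>
    exact pvPass_conv (K + 1) (by omega) θ (pvIter pvE0 K) (pvIter θ K) ihK

theorem pv_getD_set (l : List Int) (j : ℕ) (v : Int) (i : ℕ) (hj : j < l.length) :
    (l.set j v).getD i 0 = if i = j then v else l.getD i 0 := by
  simp only [List.getD_eq_getElem?_getD, List.getElem?_set]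
  by_cases h : i = j
  · simp [h, hj]
  · rw [if_neg h, if_neg (fun hh : j = i => h hh.symm)]

theorem pv_fold_pass (B k : Int) (hk : 0 < k) (f : ℕ → ℤ) (t : Int) (hkt : k ≤ t) :
    ∀ l : List Int, l.length = B.toNat →
    (∀ i : ℕ, i < B.toNat → l.getD i 0 = if (i:Int) < t then pvPass k.toNat f i else f i) →
    (((PySem.List.pyRange t B 1).foldl (fun p n =>
        p.set n.toNat (PySem.List.pyGetD p n 0 + PySem.List.pyGetD p (n - k) 0)) l).length = B.toNat ∧
     ∀ i : ℕ, i < B.toNat →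
      ((PySem.List.pyRange t B 1).foldl (fun p n =>
        p.set n.toNat (PySem.List.pyGetD p n 0 + PySem.List.pyGetD p (n - k) 0)) l).getD i 0 = pvPass k.toNat f i) := by
  intro l hlen hl
  by_cases ht : t < B
  · rw [PySem.List.pyRange_one_cons ht, List.foldl_cons]
    have h0t : 0 ≤ t := by omega
    have htN : t.toNat < B.toNat := by omega
    -- value written at position t
    have hread1 : PySem.List.pyGetD l t 0 = f t.toNat := by
      rw [PySem.List.pyGetD_of_nonneg l 0 h0t, hl t.toNat (by omega)]
      rw [if_neg (by omega)]
    have hread2 : PySem.List.pyGetD l (t - k) 0 = pvPass k.toNat f (t.toNat - k.toNat) := by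
      rw [PySem.List.pyGetD_of_nonneg l 0 (by omega), hl (t - k).toNat (by omega)]
      rw [if_pos (by omega)]
      congr 1
      omega
    have hval : PySem.List.pyGetD l t 0 + PySem.List.pyGetD l (t - k) 0 = pvPass k.toNat f t.toNat := by
      rw [hread1, hread2]
      conv_rhs => rw [pvPass]
      rw [dif_pos (⟨by omega, by omega⟩ : 0 < k.toNat ∧ k.toNat ≤ t.toNat)]
    refine pv_fold_pass B k hk f (t + 1) (by omega) _ (by simp [hlen]) ?_
    intro i hi
    rw [pv_getD_set _ _ _ _ (by omega)]
    by_cases hit : i = t.toNat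
    · rw [if_pos hit, if_pos (by omega), hit, ← hval]
    · rw [if_neg hit, hl i hi]
      by_cases hlt : (i:Int) < t
      · rw [if_pos hlt, if_pos (by omega)]
      · rw [if_neg hlt, if_neg (by omega)]
  · rw [PySem.List.pyRange_one_eq_nil (by omega), List.foldl_nil]
    refine ⟨hlen, fun i hi => ?_⟩
    rw [hl i hi, if_pos (by omega)]
termination_by (B - t).toNat
decreasing_by omega

theorem pv_fold_iter (B : Int) (f : ℕ → ℤ) (t : Int) (ht : 1 ≤ t) (htB : t ≤ B) :
    ∀ l : List Int, l.length = B.toNat →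
    (∀ i : ℕ, i < B.toNat → l.getD i 0 = pvIter f (t - 1).toNat i) →
    (((PySem.List.pyRange t B 1).foldl (fun p k =>
        (PySem.List.pyRange k B 1).foldl (fun p n =>
          p.set n.toNat (PySem.List.pyGetD p n 0 + PySem.List.pyGetD p (n - k) 0)) p) l).length = B.toNat ∧
     ∀ i : ℕ, i < B.toNat →
      ((PySem.List.pyRange t B 1).foldl (fun p k =>
        (PySem.List.pyRange k B 1).foldl (fun p n =>
          p.set n.toNat (PySem.List.pyGetD p n 0 + PySem.List.pyGetD p (n - k) 0)) p) l).getD i 0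
        = pvIter f (B - 1).toNat i) := by
  intro l hlen hl
  by_cases htlt : t < B
  · rw [PySem.List.pyRange_one_cons htlt, List.foldl_cons]
    -- the inner fold is one pass with part size t
    have hpass := pv_fold_pass B t (by omega) (pvIter f (t - 1).toNat) t (le_refl t) l hlen ?_
    · have hstep : ∀ i : ℕ, i < B.toNat →
          ((PySem.List.pyRange t B 1).foldl (fun p n =>
            p.set n.toNat (PySem.List.pyGetD p n 0 + PySem.List.pyGetD p (n - t) 0)) l).getD i 0
          = pvIter f (t.toNat) i := by
        intro i hi
        rw [hpass.2 i hi]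
        have : t.toNat = (t - 1).toNat + 1 := by omega
        rw [this, pvIter]
      refine pv_fold_iter B f (t + 1) (by omega) (by omega) _ hpass.1 ?_
      intro i hi
      rw [hstep i hi]
      congr 1
      omega
    · intro i hi
      rw [hl i hi]
      by_cases hit : (i:Int) < t
      · rw [if_pos hit, pvPass, dif_neg (by omega)]
        ring
      · rw [if_neg hit]
  · have hteq : t = B := by omega
    rw [PySem.List.pyRange_one_eq_nil (by omega), List.foldl_nil]
    refine ⟨hlen, fun i hi => ?_⟩
    rw [hl i hi]
    congr 1
    omega
termination_by (B - t).toNat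
decreasing_by omega

def pvContrib (k : Int) (e : ℕ) : ℤ :=
  (if 2 * k * (6 * k - 1) = (e:Int) then 1 else 0) + (if 12 * k * k + 10 * k + 2 = (e:Int) then -1 else 0)
def pvThetaF (e : ℕ) : ℤ := ((PySem.List.pyRange (-100) 101 1).map (fun k => pvContrib k e)).sum
theorem pv_e1_nonneg (k : Int) : 0 ≤ 2 * k * (6 * k - 1) := by
  rcases (show k ≤ 0 ∨ 1 ≤ k by omega) with h | h <;> nlinarith
theorem pv_e2_nonneg (k : Int) : 0 ≤ 12 * k * k + 10 * k + 2 := by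
  rcases (show k ≤ -1 ∨ 0 ≤ k by omega) with h | h <;> nlinarith

theorem pv_bump (Lv e s : Int) (l : List Int) (hlen : l.length = (Lv + 1).toNat) (he : 0 ≤ e)
    (c : Prop) [Decidable c] (hc : c ↔ e ≤ Lv) :
    ((if c then l.set e.toNat (PySem.List.pyGetD l e 0 + s) else l).length = (Lv + 1).toNat) ∧
    ∀ i : ℕ, i < (Lv + 1).toNat →
      (if c then l.set e.toNat (PySem.List.pyGetD l e 0 + s) else l).getD i 0
        = l.getD i 0 + (if e = (i:Int) then s else 0) := by
  by_cases hcc : c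
  · have heLv : e ≤ Lv := hc.1 hcc
    rw [if_pos hcc]
    refine ⟨by simp [hlen], fun i hi => ?_⟩
    rw [pv_getD_set _ _ _ _ (by omega)]
    by_cases hie : i = e.toNat
    · rw [if_pos hie, if_pos (by omega), PySem.List.pyGetD_of_nonneg l 0 he, hie]
    · rw [if_neg hie, if_neg (by omega), add_zero]
  · rw [if_neg hcc]
    refine ⟨hlen, fun i hi => ?_⟩
    rw [if_neg (by rw [hc] at hcc; omega), add_zero]

theorem pv_fold_thetaA (Lv : Int) :
    ∀ (ks : List Int) (l : List Int), l.length = (Lv + 1).toNat →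
    ((ks.foldl (fun t k =>
        let exp1 := 2 * k * (6 * k - 1)
        let t := if 0 ≤ exp1 ∧ exp1 ≤ Lv then t.set exp1.toNat (PySem.List.pyGetD t exp1 0 + 1) else t
        let exp2 := 12 * k * k + 10 * k + 2
        if 0 ≤ exp2 ∧ exp2 ≤ Lv then t.set exp2.toNat (PySem.List.pyGetD t exp2 0 - 1) else t) l).length = (Lv + 1).toNat ∧
     ∀ i : ℕ, i < (Lv + 1).toNat →
      (ks.foldl (fun t k =>
        let exp1 := 2 * k * (6 * k - 1)
        let t := if 0 ≤ exp1 ∧ exp1 ≤ Lv then t.set exp1.toNat (PySem.List.pyGetD t exp1 0 + 1) else t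
        let exp2 := 12 * k * k + 10 * k + 2
        if 0 ≤ exp2 ∧ exp2 ≤ Lv then t.set exp2.toNat (PySem.List.pyGetD t exp2 0 - 1) else t) l).getD i 0
        = l.getD i 0 + ((ks.map (fun k => pvContrib k i)).sum)) := by
  intro ks
  induction ks with
  | nil => intro l hlen; exact ⟨hlen, fun i _ => by simp⟩
  | cons k ks ih =>
    intro l hlen
    rw [List.foldl_cons]
    have h1 := pv_bump Lv (2 * k * (6 * k - 1)) 1 l hlen (pv_e1_nonneg k)
      (0 ≤ 2 * k * (6 * k - 1) ∧ 2 * k * (6 * k - 1) ≤ Lv) ⟨And.right, fun h => ⟨pv_e1_nonneg k, h⟩⟩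
    set l1 := if 0 ≤ 2 * k * (6 * k - 1) ∧ 2 * k * (6 * k - 1) ≤ Lv then
        l.set (2 * k * (6 * k - 1)).toNat (PySem.List.pyGetD l (2 * k * (6 * k - 1)) 0 + 1) else l with hl1
    have h2 := pv_bump Lv (12 * k * k + 10 * k + 2) (-1) l1 h1.1 (pv_e2_nonneg k)
      (0 ≤ 12 * k * k + 10 * k + 2 ∧ 12 * k * k + 10 * k + 2 ≤ Lv) ⟨And.right, fun h => ⟨pv_e2_nonneg k, h⟩⟩
    set l2 := if 0 ≤ 12 * k * k + 10 * k + 2 ∧ 12 * k * k + 10 * k + 2 ≤ Lv then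
        l1.set (12 * k * k + 10 * k + 2).toNat (PySem.List.pyGetD l1 (12 * k * k + 10 * k + 2) 0 + (-1)) else l1 with hl2
    have hstep : (let exp1 := 2 * k * (6 * k - 1)
        let t := if 0 ≤ exp1 ∧ exp1 ≤ Lv then l.set exp1.toNat (PySem.List.pyGetD l exp1 0 + 1) else l
        let exp2 := 12 * k * k + 10 * k + 2
        if 0 ≤ exp2 ∧ exp2 ≤ Lv then t.set exp2.toNat (PySem.List.pyGetD t exp2 0 - 1) else t) = l2 := by
      show (if 0 ≤ 12 * k * k + 10 * k + 2 ∧ 12 * k * k + 10 * k + 2 ≤ Lv then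
        l1.set (12 * k * k + 10 * k + 2).toNat (PySem.List.pyGetD l1 (12 * k * k + 10 * k + 2) 0 - 1) else l1) = l2
      rw [hl2, sub_eq_add_neg]
    rw [hstep]
    have hrec := ih l2 h2.1
    refine ⟨hrec.1, fun i hi => ?_⟩
    rw [hrec.2 i hi, h2.2 i hi, h1.2 i hi, List.map_cons, List.sum_cons]
    unfold pvContrib
    ring

theorem pv_fold_scatter (Lv : Int) :
    ∀ (ts : List (Int × Int)) (l : List Int), l.length = (Lv + 1).toNat →
    (∀ p ∈ ts, 0 ≤ p.1) →
    ((ts.foldl (fun d es =>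
        if es.1 ≤ Lv then d.set es.1.toNat (PySem.List.pyGetD d es.1 0 + es.2) else d) l).length = (Lv + 1).toNat ∧
     ∀ i : ℕ, i < (Lv + 1).toNat →
      (ts.foldl (fun d es =>
        if es.1 ≤ Lv then d.set es.1.toNat (PySem.List.pyGetD d es.1 0 + es.2) else d) l).getD i 0
        = l.getD i 0 + ((ts.map (fun es => if es.1 = (i:Int) then es.2 else 0)).sum)) := by
  intro ts
  induction ts with
  | nil => intro l hlen _; exact ⟨hlen, fun i _ => by simp⟩
  | cons p ts ih =>
    intro l hlen hpos
    rw [List.foldl_cons]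
    have h1 := pv_bump Lv p.1 p.2 l hlen (hpos p (List.mem_cons_self)) (p.1 ≤ Lv) Iff.rfl
    have hrec := ih _ h1.1 (fun q hq => hpos q (List.mem_cons_of_mem p hq))
    refine ⟨hrec.1, fun i hi => ?_⟩
    rw [hrec.2 i hi, h1.2 i hi, List.map_cons, List.sum_cons]
    ring

theorem pv_fold_set_map (B : Int) (F : Int → Int) (t : Int) (ht : 0 ≤ t) :
    ∀ l : List Int, l.length = B.toNat →
    (∀ i : ℕ, i < B.toNat → l.getD i 0 = if (i:Int) < t then F i else 0) →
    (((PySem.List.pyRange t B 1).foldl (fun d n => d.set n.toNat (F n)) l).length = B.toNat ∧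
     ∀ i : ℕ, i < B.toNat →
      ((PySem.List.pyRange t B 1).foldl (fun d n => d.set n.toNat (F n)) l).getD i 0 = F i) := by
  intro l hlen hl
  by_cases htB : t < B
  · rw [PySem.List.pyRange_one_cons htB, List.foldl_cons]
    refine pv_fold_set_map B F (t + 1) (by omega) _ (by simp [hlen]) ?_
    intro i hi
    rw [pv_getD_set _ _ _ _ (by omega)]
    by_cases hit : i = t.toNat
    · rw [if_pos hit, if_pos (by omega), hit]
      congr 1
      omega
    · rw [if_neg hit, hl i hi]
      by_cases hlt : (i:Int) < t
      · rw [if_pos hlt, if_pos (by omega)]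
      · rw [if_neg hlt, if_neg (by omega)]
  · rw [PySem.List.pyRange_one_eq_nil (by omega), List.foldl_nil]
    refine ⟨hlen, fun i hi => ?_⟩
    rw [hl i hi, if_pos (by omega)]
termination_by (B - t).toNat
decreasing_by omega

theorem pv_conv_total (th pt : List Int) (n : Int) (hn : 0 ≤ n) :
    (PySem.List.pyRange 0 (n + 1) 1).foldl (fun total m =>
      total + PySem.List.pyGetD th m 0 * PySem.List.pyGetD pt (n - m) 0) 0
    = ∑ j ∈ Finset.range (n + 1).toNat, th.getD j 0 * pt.getD (n.toNat - j) 0 := by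
  rw [PySem.List.foldl_add _ (fun m => PySem.List.pyGetD th m 0 * PySem.List.pyGetD pt (n - m) 0) 0, zero_add]
  rw [PySem.List.pyRange_zero, List.map_map]
  have hls : ∀ (N : ℕ) (f : ℕ → ℤ), ((List.range N).map f).sum = ∑ i ∈ Finset.range N, f i := fun _ _ => rfl
  rw [hls ((n + 1).toNat) ((fun m => PySem.List.pyGetD th m 0 * PySem.List.pyGetD pt (n - m) 0) ∘ (fun k : ℕ => (k:Int)))]
  apply Finset.sum_congr rfl
  intro j hj
  simp only [Finset.mem_range] at hj
  simp only [Function.comp_apply]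
  rw [PySem.List.pyGetD_natCast, PySem.List.pyGetD_of_nonneg pt 0 (by omega)]
  have hjn : (n - (j:Int)).toNat = n.toNat - j := by omega
  rw [hjn]

theorem pv_terms_eq :
    ((PySem.List.pyRange (-100) 101 1).foldl (fun acc k =>
      (acc ++ [(2 * k * (6 * k - 1), (1:Int))]) ++ [(12 * k * k + 10 * k + 2, (-1:Int))]) [])
    = (PySem.List.pyRange (-100) 101 1).flatMap
        (fun k => [(2 * k * (6 * k - 1), (1:Int)), (12 * k * k + 10 * k + 2, (-1:Int))]) := by
  rw [show (fun (acc : List (Int × Int)) (k : Int) =>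
      (acc ++ [(2 * k * (6 * k - 1), (1:Int))]) ++ [(12 * k * k + 10 * k + 2, (-1:Int))])
      = (fun acc k => acc ++ [(2 * k * (6 * k - 1), (1:Int)), (12 * k * k + 10 * k + 2, (-1:Int))]) from
    funext fun acc => funext fun k => by rw [List.append_assoc]; rfl]
  rw [PySem.List.foldl_append_eq_flatMap]
  rfl

theorem pv_sum_flatMap (l : List Int) (g : Int → List Int) :
    (l.flatMap g).sum = (l.map (fun a => (g a).sum)).sum := by
  induction l with
  | nil => simp
  | cons a t ih => simp [List.flatMap_cons, ih]

theorem pv_A_char (L : Int) (hL : 0 ≤ L) :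
    (ising_spin_character_coeffs L).length = (L + 1).toNat ∧
    ∀ i : ℕ, i < (L + 1).toNat → (ising_spin_character_coeffs L).getD i 0
      = ∑ j ∈ Finset.range (i + 1), pvThetaF j * pvIter pvE0 L.toNat (i - j) := by
  -- the partitions array
  have hPinit : ∀ i : ℕ, i < (L + 1).toNat →
      ((List.replicate (L + 1).toNat (0:Int)).set 0 1).getD i 0 = pvIter pvE0 ((1:Int) - 1).toNat i := by
    intro i hi
    rw [pv_getD_set _ _ _ _ (by simp; omega)]
    have h10 : ((1:Int) - 1).toNat = 0 := rfl
    rw [h10]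
    show _ = pvE0 i
    unfold pvE0
    by_cases h0 : i = 0
    · rw [if_pos h0, if_pos h0]
    · rw [if_neg h0, if_neg h0, List.getD_replicate _ hi]
  have hP := pv_fold_iter (L + 1) pvE0 1 (by omega) (by omega)
      ((List.replicate (L + 1).toNat (0:Int)).set 0 1) (by simp) hPinit
  -- the theta array
  have hθ := pv_fold_thetaA L (PySem.List.pyRange (-100) 101 1) (List.replicate (L + 1).toNat (0:Int)) (by simp)
  -- the dims array
  set PL := (PySem.List.pyRange 1 (L + 1) 1).foldl (fun p k =>
    (PySem.List.pyRange k (L + 1) 1).foldl (fun p n =>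
      p.set n.toNat (PySem.List.pyGetD p n 0 + PySem.List.pyGetD p (n - k) 0)) p)
      ((List.replicate (L + 1).toNat (0:Int)).set 0 1) with hPL
  set θL := (PySem.List.pyRange (-100) 101 1).foldl (fun t k =>
    let exp1 := 2 * k * (6 * k - 1)
    let t := if 0 ≤ exp1 ∧ exp1 ≤ L then t.set exp1.toNat (PySem.List.pyGetD t exp1 0 + 1) else t
    let exp2 := 12 * k * k + 10 * k + 2
    if 0 ≤ exp2 ∧ exp2 ≤ L then t.set exp2.toNat (PySem.List.pyGetD t exp2 0 - 1) else t)
      (List.replicate (L + 1).toNat (0:Int)) with hθL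
  have hAeq : ising_spin_character_coeffs L
      = (PySem.List.pyRange 0 (L + 1) 1).foldl (fun d n =>
          d.set n.toNat ((PySem.List.pyRange 0 (n + 1) 1).foldl (fun total m =>
            total + PySem.List.pyGetD θL m 0 * PySem.List.pyGetD PL (n - m) 0) 0))
          (List.replicate (L + 1).toNat (0:Int)) := by
    rw [hPL, hθL]
    rfl
  have hdims := pv_fold_set_map (L + 1)
      (fun n => (PySem.List.pyRange 0 (n + 1) 1).foldl (fun total m =>
        total + PySem.List.pyGetD θL m 0 * PySem.List.pyGetD PL (n - m) 0) 0)
      0 (le_refl 0) (List.replicate (L + 1).toNat (0:Int)) (by simp)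
      (fun i hi => by rw [if_neg (by omega), List.getD_replicate _ hi])
  rw [hAeq]
  refine ⟨hdims.1, fun i hi => ?_⟩
  rw [hdims.2 i hi]
  beta_reduce
  rw [pv_conv_total θL PL (i:Int) (by omega)]
  have hcast : ((i:Int) + 1).toNat = i + 1 := by omega
  have hcast2 : ((i:Int)).toNat = i := by omega
  rw [hcast, hcast2]
  apply Finset.sum_congr rfl
  intro j hj
  simp only [Finset.mem_range] at hj
  rw [hθ.2 j (by omega)]
  rw [hP.2 (i - j) (by omega)]
  rw [List.getD_replicate _ (show j < (L+1).toNat by omega)]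
  have : ((L:Int) + 1 - 1).toNat = L.toNat := by omega
  rw [this]
  rw [zero_add]
  rfl

theorem pv_B_char (L : Int) (hL : 0 ≤ L) :
    (ising_spin_character_coeffs_alt L).length = (L + 1).toNat ∧
    ∀ i : ℕ, i < (L + 1).toNat → (ising_spin_character_coeffs_alt L).getD i 0
      = pvIter pvThetaF L.toNat i := by
  have hsc := pv_fold_scatter L
      ((PySem.List.pyRange (-100) 101 1).flatMap
        (fun k => [(2 * k * (6 * k - 1), (1:Int)), (12 * k * k + 10 * k + 2, (-1:Int))]))
      (List.replicate (L + 1).toNat (0:Int)) (by simp)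
      (by
        intro p hp
        simp only [List.mem_flatMap] at hp
        rcases hp with ⟨k, _, hk⟩
        simp only [List.mem_cons] at hk
        rcases hk with h | h | h
        · rw [h]; exact pv_e1_nonneg k
        · rw [h]; exact pv_e2_nonneg k
        · exact absurd h (by simp))
  set SL := ((PySem.List.pyRange (-100) 101 1).flatMap
        (fun k => [(2 * k * (6 * k - 1), (1:Int)), (12 * k * k + 10 * k + 2, (-1:Int))])).foldl
      (fun d es => if es.1 ≤ L then d.set es.1.toNat (PySem.List.pyGetD d es.1 0 + es.2) else d)
      (List.replicate (L + 1).toNat (0:Int)) with hSL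
  have hBeq : ising_spin_character_coeffs_alt L
      = (PySem.List.pyRange 1 (L + 1) 1).foldl (fun d k =>
          (PySem.List.pyRange k (L + 1) 1).foldl (fun d n =>
            d.set n.toNat (PySem.List.pyGetD d n 0 + PySem.List.pyGetD d (n - k) 0)) d) SL := by
    rw [hSL, ← pv_terms_eq]
    rfl
  have hSval : ∀ i : ℕ, i < (L + 1).toNat → SL.getD i 0 = pvThetaF i := by
    intro i hi
    rw [hsc.2 i hi, List.getD_replicate _ hi, zero_add]
    rw [List.map_flatMap, pv_sum_flatMap]
    unfold pvThetaF
    apply congrArg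
    apply List.map_congr_left
    intro k _
    simp [pvContrib]
  have hdp := pv_fold_iter (L + 1) pvThetaF 1 (by omega) (by omega) SL (hSL ▸ hsc.1)
      (by
        intro i hi
        rw [hSval i hi]
        rfl)
  rw [hBeq]
  refine ⟨hdp.1, fun i hi => ?_⟩
  rw [hdp.2 i hi]
  have : ((L:Int) + 1 - 1).toNat = L.toNat := by omega
  rw [this]

theorem pv_final (L : Int) (hL : 0 ≤ L) :
    ising_spin_character_coeffs L = ising_spin_character_coeffs_alt L := by
  have hA := pv_A_char L hL
  have hB := pv_B_char L hL
  apply List.ext_getElem (hA.1.trans hB.1.symm)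
  intro i h1 h2
  have hi : i < (L + 1).toNat := hA.1 ▸ h1
  calc (ising_spin_character_coeffs L)[i]
      = (ising_spin_character_coeffs L).getD i 0 := (List.getD_eq_getElem _ _ h1).symm
    _ = ∑ j ∈ Finset.range (i + 1), pvThetaF j * pvIter pvE0 L.toNat (i - j) := hA.2 i hi
    _ = pvIter pvThetaF L.toNat i := (pvIter_conv pvThetaF L.toNat i).symm
    _ = (ising_spin_character_coeffs_alt L).getD i 0 := (hB.2 i hi).symm
    _ = (ising_spin_character_coeffs_alt L)[i] := List.getD_eq_getElem _ _ h2


-- ===== VERDICT (by name: the statement is the Claim_ definition above) =====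
theorem ising_spin_character_coeffs_spec : Claim_equal_ising_spin_character_coeffs := by
  intro max_level _ hpre
  unfold Spec_ising_spin_character_coeffs
  exact pv_final max_level hpre
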